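-- pv_equiv track=rewrite | github.com/jasrusable/state-aggregator | src/main.py | get_all_nested_sensors_for_group
-- ===== SOURCE A (Python) =====
-- def get_all_nested_child_groups(group, child_to_parent_group_mapping):
--     mappings = [{'child': child, 'parent': parent}
--                 for child, parent in child_to_parent_group_mapping.items()]
--     children = []
--
--     def walk(g):
--         filtered_mappings = list(filter(lambda x: x['parent'] == g, mappings))
--         child_groups = [mapping['child'] for mapping in filtered_mappings]
--         if child_groups:
--             children.extend(child_groups)
--             for child in child_groups:
--                 walk(child)
--
--     walk(group)
--     return children
--
-- def get_all_nested_sensors_for_group(group, sensor_to_group_mapping, child_to_parent_group_mapping):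
--     all_groups = get_all_nested_child_groups(
--         group, child_to_parent_group_mapping)
--     all_groups.extend([group])
--     mappings = [{'sensor': sensor, 'group': group}
--                 for sensor, group in sensor_to_group_mapping.items()]
--     filtered_mappings = list(
--         filter(lambda x: x['group'] in all_groups, mappings))
--     sensors = [mapping['sensor'] for mapping in filtered_mappings]
--     return sensors
-- ===== SOURCE B (Python) =====
-- def get_all_nested_sensors_for_group(group, sensor_to_group_mapping, child_to_parent_group_mapping):
--     # Build parent -> children adjacency once, instead of re-filtering the whole
--     # mapping list for every visited group.
--     children_of = {}
--     for child, parent in child_to_parent_group_mapping.items():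
--         children_of.setdefault(parent, []).append(child)
--
--     def collect(g):
--         out = []
--         for child in children_of.get(g, []):
--             out.append(child)
--             out.extend(collect(child))
--         return out
--
--     groups = set(collect(group))
--     groups.add(group)
--     return [sensor for sensor, g in sensor_to_group_mapping.items() if g in groups]
-- ===== Notes on version B (the rewrite author's own statement) =====
-- stated objective: faster
-- what changed: B builds a parent->children adjacency dict once and tests sensor groups against a set, instead of A's re-filtering the whole child mapping for every visited group and scanning the collected group list for every sensor.
import Mathlib
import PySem

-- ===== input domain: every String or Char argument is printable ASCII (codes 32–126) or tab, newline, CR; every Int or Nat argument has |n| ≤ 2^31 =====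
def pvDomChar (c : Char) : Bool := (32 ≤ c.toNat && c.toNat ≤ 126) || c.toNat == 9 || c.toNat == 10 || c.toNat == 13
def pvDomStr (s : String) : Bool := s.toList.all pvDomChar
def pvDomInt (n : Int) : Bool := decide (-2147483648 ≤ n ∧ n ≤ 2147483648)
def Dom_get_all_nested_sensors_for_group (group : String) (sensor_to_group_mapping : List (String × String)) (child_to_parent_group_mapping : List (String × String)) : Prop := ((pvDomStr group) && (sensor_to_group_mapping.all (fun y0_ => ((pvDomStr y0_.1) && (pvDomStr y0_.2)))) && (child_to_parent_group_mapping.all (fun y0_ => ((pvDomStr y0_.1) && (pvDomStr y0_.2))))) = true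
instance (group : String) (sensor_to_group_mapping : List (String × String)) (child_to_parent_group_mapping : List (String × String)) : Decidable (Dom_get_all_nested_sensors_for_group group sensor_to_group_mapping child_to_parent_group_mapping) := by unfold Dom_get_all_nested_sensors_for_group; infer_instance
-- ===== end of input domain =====

-- B replaces A's per-group re-filtering of the whole mapping by a parent→children
-- adjacency dict built once, and the per-sensor list scan by a set membership test
-- (objective: faster, asymptotic).

-- ===== PORT A =====
-- filtered_mappings = filter(lambda x: x['parent'] == g, mappings); child_groups = [m['child'] ...]
def pvChildrenOf (m : List (String × String)) (g : String) : List String :=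
  (m.filter (fun x => x.2 == g)).map (fun x => x.1)

-- walk(g): children.extend(child_groups); for child in child_groups: walk(child)
-- fuel recursion: under Pre_ (group not on a cycle, dict keys distinct) the recursion
-- depth is at most the number of mappings, so fuel = length + 1 never truncates.
def pvWalkA (m : List (String × String)) : Nat → String → List String
  | 0, _ => []
  | n + 1, g =>
    let child_groups := pvChildrenOf m g
    child_groups ++ child_groups.flatMap (fun c => pvWalkA m n c)

def get_all_nested_sensors_for_group (group : String) (sensor_to_group_mapping : List (String × String)) (child_to_parent_group_mapping : List (String × String)) : List String :=
  let all_groups := pvWalkA child_to_parent_group_mapping (child_to_parent_group_mapping.length + 1) group ++ [group]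
  (sensor_to_group_mapping.filter (fun x => all_groups.contains x.2)).map (fun x => x.1)

-- ===== PORT B =====
-- children_of.setdefault(parent, []).append(child)
def pvAdj (c2p : List (String × String)) : PySem.Dict String (List String) :=
  c2p.foldl (fun d cp => d.modify cp.2 [] (fun l => l ++ [cp.1])) PySem.Dict.empty

-- collect(g): for child in children_of.get(g, []): out.append(child); out.extend(collect(child))
-- same fuel convention as the port of A (one unit per recursion level).
def pvCollect (adj : PySem.Dict String (List String)) : Nat → String → List String
  | 0, _ => []
  | n + 1, g => (adj.getD g []).flatMap (fun c => c :: pvCollect adj n c)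

def get_all_nested_sensors_for_group_alt (group : String) (sensor_to_group_mapping : List (String × String)) (child_to_parent_group_mapping : List (String × String)) : List String :=
  let adj := pvAdj child_to_parent_group_mapping
  let groups : PySem.Set String :=
    PySem.Set.add (PySem.Set.ofList (pvCollect adj (child_to_parent_group_mapping.length + 1) group)) group
  (sensor_to_group_mapping.filter (fun x => PySem.Set.contains groups x.2)).map (fun x => x.1)

-- ===== PRECONDITION & SPEC =====
def pvParent? (m : List (String × String)) (g : String) : Option String :=
  (m.find? (fun p => p.1 == g)).map (fun p => p.2)

def pvAncestor (m : List (String × String)) (g : String) : Nat → Option String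
  | 0 => some g
  | k + 1 => (pvAncestor m g k).bind (pvParent? m)

-- Pre_ excludes (a) association lists with duplicate child keys, which do not represent a
-- Python dict (A's argument is a dict, whose keys are distinct), and (b) inputs where group
-- lies on a cycle of the child→parent mapping, on which Python A's recursion never returns
-- (RecursionError).
def Pre_get_all_nested_sensors_for_group (group : String) (sensor_to_group_mapping : List (String × String)) (child_to_parent_group_mapping : List (String × String)) : Prop :=
  (child_to_parent_group_mapping.map Prod.fst).Nodup ∧
  ∀ k < child_to_parent_group_mapping.length,
    pvAncestor child_to_parent_group_mapping group (k + 1) ≠ some group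
instance (group : String) (sensor_to_group_mapping : List (String × String)) (child_to_parent_group_mapping : List (String × String)) : Decidable (Pre_get_all_nested_sensors_for_group group sensor_to_group_mapping child_to_parent_group_mapping) := by unfold Pre_get_all_nested_sensors_for_group; infer_instance

def pvWitness_get_all_nested_sensors_for_group : String × (List (String × String)) × (List (String × String)) :=
  ("a", [("s1", "a"), ("s2", "b")], [("b", "a")])

def Spec_get_all_nested_sensors_for_group (group : String) (sensor_to_group_mapping : List (String × String)) (child_to_parent_group_mapping : List (String × String)) (out : List String) : Prop := out = get_all_nested_sensors_for_group_alt group sensor_to_group_mapping child_to_parent_group_mapping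
instance (group : String) (sensor_to_group_mapping : List (String × String)) (child_to_parent_group_mapping : List (String × String)) (out : List String) : Decidable (Spec_get_all_nested_sensors_for_group group sensor_to_group_mapping child_to_parent_group_mapping out) := by unfold Spec_get_all_nested_sensors_for_group; infer_instance

-- ===== CLAIM (what is proved, stated in full; the proofs are below) =====
def Claim_equal_get_all_nested_sensors_for_group : Prop := ∀ (group : String) (sensor_to_group_mapping : List (String × String)) (child_to_parent_group_mapping : List (String × String)), Dom_get_all_nested_sensors_for_group group sensor_to_group_mapping child_to_parent_group_mapping → Pre_get_all_nested_sensors_for_group group sensor_to_group_mapping child_to_parent_group_mapping → Spec_get_all_nested_sensors_for_group group sensor_to_group_mapping child_to_parent_group_mapping (get_all_nested_sensors_for_group group sensor_to_group_mapping child_to_parent_group_mapping)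

-- ===== LEMMAS AND PROOFS =====

-- the adjacency dict built by B maps g to exactly the children A's filter finds for g
theorem pvAdj_getD (c2p : List (String × String)) (g : String) :
    (pvAdj c2p).getD g [] = pvChildrenOf c2p g := by
  suffices h : ∀ d : PySem.Dict String (List String),
      (c2p.foldl (fun d cp => d.modify cp.2 [] (fun l => l ++ [cp.1])) d).getD g []
        = d.getD g [] ++ pvChildrenOf c2p g by
    simpa [pvAdj] using h PySem.Dict.empty
  induction c2p with
  | nil => intro d; simp [pvChildrenOf]
  | cons cp rest ih =>
    intro d
    rw [List.foldl_cons, ih]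
    by_cases hg : g = cp.2
    · subst hg
      simp [pvChildrenOf, PySem.Dict.getD_modify_self, List.append_assoc]
    · have hne : cp.2 ≠ g := fun h => hg h.symm
      simp [pvChildrenOf, PySem.Dict.getD_modify_of_ne _ _ _ hg, beq_iff_eq, hne]

-- at equal fuel, A's walk and B's collect visit the same groups
theorem pvWalk_mem (m : List (String × String)) :
    ∀ (n : Nat) (g x : String), x ∈ pvWalkA m n g ↔ x ∈ pvCollect (pvAdj m) n g := by
  intro n
  induction n with
  | zero => intro g x; simp [pvWalkA, pvCollect]
  | succ n ih =>
    intro g x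
    simp only [pvWalkA, pvCollect, pvAdj_getD, List.mem_append, List.mem_flatMap,
      List.mem_cons, ih]
    constructor
    · rintro (hx | ⟨c, hc, hx⟩)
      · exact ⟨x, hx, Or.inl rfl⟩
      · exact ⟨c, hc, Or.inr hx⟩
    · rintro ⟨c, hc, rfl | hx⟩
      · exact Or.inl hc
      · exact Or.inr ⟨c, hc, hx⟩

-- ===== VERDICT (by name: the statement is the Claim_ definition above) =====
theorem get_all_nested_sensors_for_group_spec : Claim_equal_get_all_nested_sensors_for_group := by
  intro group s2g c2p _ _
  unfold Spec_get_all_nested_sensors_for_group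
  unfold get_all_nested_sensors_for_group get_all_nested_sensors_for_group_alt
  simp only []
  congr 1
  apply List.filter_congr
  intro x _
  apply Bool.eq_iff_iff.mpr
  simp only [List.contains_iff_mem, PySem.Set.contains_iff, PySem.Set.mem_add,
    PySem.Set.mem_ofList, List.mem_append, List.mem_singleton, pvWalk_mem]
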